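-- pv_equiv track=rewrite | github.com/TudorMinut/Python_Minut_Alexandru_Tudor | Lab3_homework/lab3.py | zero_below_diagonal
-- ===== SOURCE A (Python) =====
-- def zero_below_diagonal(matrix):
--     result = []
--     for i in range(len(matrix)):
--         row = []
--         for j in range(len(matrix[i])):
--             if i > j:
--                 row.append(0)
--             else:
--                 row.append(matrix[i][j])
--         result.append(row)
--     return result
-- ===== SOURCE B (Python) =====
-- def zero_below_diagonal(matrix):
--     return [[0] * min(i, len(row)) + row[i:] for i, row in enumerate(matrix)]
-- ===== Notes on version B (the rewrite author's own statement) =====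
-- stated objective: simpler
-- what changed: Replaces the nested per-element index loop with an i>j branch by a single comprehension over rows that builds each row as [0]*min(i,len(row)) + row[i:] (prefix of zeros plus a slice).
import Mathlib
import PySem

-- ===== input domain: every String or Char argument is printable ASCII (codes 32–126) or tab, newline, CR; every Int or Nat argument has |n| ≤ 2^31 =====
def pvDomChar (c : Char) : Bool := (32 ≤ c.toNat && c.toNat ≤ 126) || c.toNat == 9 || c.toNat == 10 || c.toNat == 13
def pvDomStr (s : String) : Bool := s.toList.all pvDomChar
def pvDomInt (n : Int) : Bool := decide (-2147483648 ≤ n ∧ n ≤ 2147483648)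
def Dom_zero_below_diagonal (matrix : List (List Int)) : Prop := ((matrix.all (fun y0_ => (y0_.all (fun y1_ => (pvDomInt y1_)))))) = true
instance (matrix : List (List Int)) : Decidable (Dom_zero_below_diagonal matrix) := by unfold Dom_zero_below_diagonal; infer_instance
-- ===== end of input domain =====

-- B builds each row as a zero prefix plus a tail slice (one loop over rows) instead of A's
-- per-element nested loop with an i>j branch; same return value, no speed claim.

-- ===== PORT A =====
def zero_below_diagonal (matrix : List (List Int)) : List (List Int) :=
  (PySem.List.pyRange 0 (matrix.length : Int) 1).foldl (fun result i =>
    result ++ [ (PySem.List.pyRange 0 ((PySem.List.pyGetD matrix i []).length : Int) 1).foldl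
      (fun row j => row ++ [if i > j then 0 else PySem.List.pyGetD (PySem.List.pyGetD matrix i []) j 0]) [] ]) []

-- ===== PORT B =====
def zero_below_diagonal_alt (matrix : List (List Int)) : List (List Int) :=
  (PySem.List.enumerate matrix).map (fun p =>
    List.replicate (min p.1.toNat p.2.length) 0 ++ PySem.List.slice p.2 (some p.1) none)

-- ===== PRECONDITION & SPEC =====
def Spec_zero_below_diagonal (matrix : List (List Int)) (out : List (List Int)) : Prop := out = zero_below_diagonal_alt matrix
instance (matrix : List (List Int)) (out : List (List Int)) : Decidable (Spec_zero_below_diagonal matrix out) := by unfold Spec_zero_below_diagonal; infer_instance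

-- ===== CLAIM (what is proved, stated in full; the proofs are below) =====
def Claim_equal_zero_below_diagonal : Prop := ∀ (matrix : List (List Int)), Dom_zero_below_diagonal matrix → Spec_zero_below_diagonal matrix (zero_below_diagonal matrix)

-- ===== LEMMAS AND PROOFS =====

-- enumerate at an index
lemma enumerate_getElem (xs : List (List Int)) (s : Int) (k : Nat) (hk : k < xs.length) :
    (PySem.List.enumerate xs s)[k]'(by simpa [PySem.List.length_enumerate] using hk) = (s + k, xs[k]) := by
  induction xs generalizing s k with
  | nil => simp at hk
  | cons x xs ih =>
    cases k with
    | zero => simp [PySem.List.enumerate_cons]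
    | succ k =>
      have := ih (s + 1) k (by simpa using Nat.lt_of_succ_lt_succ hk)
      simp only [PySem.List.enumerate_cons, List.getElem_cons_succ, this]
      congr 1
      push_cast
      ring

-- one row of A equals one row of B
lemma row_eq (row : List Int) (i : Nat) :
    (PySem.List.pyRange 0 (row.length : Int) 1).foldl
      (fun r j => r ++ [if (i : Int) > j then 0 else PySem.List.pyGetD row j 0]) []
    = List.replicate (min i row.length) 0 ++ PySem.List.slice row (some (i : Int)) none := by
  rw [PySem.List.foldl_append_singleton_eq_map, PySem.List.pyRange_one]
  simp only [List.map_map, PySem.List.slice_some_none, PySem.List.clampIdx_natCast, List.nil_append]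
  apply List.ext_getElem
  · simp
  · intro k h1 h2
    simp only [List.getElem_map, List.getElem_range, Function.comp]
    have hk : k < row.length := by simpa using h1
    by_cases hki : k < min i row.length
    · have : (i : Int) > (0 + (k : Int)) := by
        have := Nat.lt_min.mp hki
        omega
      rw [if_pos this]
      rw [List.getElem_append_left (by simpa using hki), List.getElem_replicate]
    · have hik : ¬ ((i : Int) > (0 + (k : Int))) := by omega
      rw [if_neg hik, List.getElem_append_right (by simp only [List.length_replicate]; omega)]
      have h0 : (0 : Int) + (k : Int) = ((k : Nat) : Int) := by ring
      rw [h0, PySem.List.pyGetD_natCast]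
      have hmin : min i row.length + (k - (List.replicate (min i row.length) (0 : Int)).length) = k := by
        simp only [List.length_replicate]; omega
      simp only [List.getElem_drop, hmin, List.getD_eq_getElem?_getD,
        List.getElem?_eq_getElem hk, Option.getD_some]

-- ===== VERDICT (by name: the statement is the Claim_ definition above) =====
theorem zero_below_diagonal_spec : Claim_equal_zero_below_diagonal := by
  intro matrix _
  show zero_below_diagonal matrix = zero_below_diagonal_alt matrix
  unfold zero_below_diagonal zero_below_diagonal_alt
  rw [PySem.List.foldl_append_singleton_eq_map, PySem.List.pyRange_one]
  simp only [List.map_map, List.nil_append]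
  apply List.ext_getElem
  · simp [PySem.List.length_enumerate]
  · intro k h1 h2
    have hk : k < matrix.length := by simpa using h1
    simp only [List.getElem_map, Function.comp, List.getElem_range, zero_add]
    rw [enumerate_getElem matrix 0 k hk, PySem.List.pyGetD_natCast]
    simp only [List.getD_eq_getElem?_getD, List.getElem?_eq_getElem hk, Option.getD_some,
      zero_add, Int.toNat_natCast]
    simpa using row_eq matrix[k] k
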